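-- pv_equiv track=rewrite | github.com/lauraguzeljblatnik/2048 | 2048.py | stisni_gor
-- ===== SOURCE A (Python) =====
-- def stisni_vrstico_levo(A):
-- #vse elemente v vrsrici stisne v levo
--     B = []
--     for i in range(len(A)):
--         if A[i] != 0:
--             B += [A[i]]
--     if B == []:
--         B = B
--     elif len(B) == 1:
--         B = B
--     elif B[0] != B[1]:
--         B = [B[0]] + stisni_vrstico_levo(B[1:])
--     elif B[0] == B[1]:
--         B = [2*B[0]] + stisni_vrstico_levo(B[2:])
--     nicle = len(A) - len(B)
--     return B + nicle*[0]
--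
-- def stisni_gor(A):
--     for j in range(0,4):
--         vrstica = []
--         for i in range(4):
--             vrstica.append(A[i][j])
--         B = stisni_vrstico_levo(vrstica)
--         for i in range (4):
--             A[i][j] = B[i]
--     return (A)
-- ===== SOURCE B (Python) =====
-- def stisni_gor(A):
--     for j in range(4):
--         nz = [A[i][j] for i in range(4) if A[i][j] != 0]
--         out = []
--         i = 0
--         while i < len(nz):
--             if i + 1 < len(nz) and nz[i] == nz[i + 1]:
--                 out.append(2 * nz[i])
--                 i += 2
--             else:
--                 out.append(nz[i])
--                 i += 1
--         out += [0] * (4 - len(out))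
--         for i in range(4):
--             A[i][j] = out[i]
--     return A
-- ===== Notes on version B (the rewrite author's own statement) =====
-- stated objective: idiomatic
-- what changed: Replaces the recursive compressor (which re-filters zeros and re-pads with zeros at every recursive call) with a single iterative two-pointer sweep over the non-zero column entries, padding zeros once at the end.
import Mathlib
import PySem

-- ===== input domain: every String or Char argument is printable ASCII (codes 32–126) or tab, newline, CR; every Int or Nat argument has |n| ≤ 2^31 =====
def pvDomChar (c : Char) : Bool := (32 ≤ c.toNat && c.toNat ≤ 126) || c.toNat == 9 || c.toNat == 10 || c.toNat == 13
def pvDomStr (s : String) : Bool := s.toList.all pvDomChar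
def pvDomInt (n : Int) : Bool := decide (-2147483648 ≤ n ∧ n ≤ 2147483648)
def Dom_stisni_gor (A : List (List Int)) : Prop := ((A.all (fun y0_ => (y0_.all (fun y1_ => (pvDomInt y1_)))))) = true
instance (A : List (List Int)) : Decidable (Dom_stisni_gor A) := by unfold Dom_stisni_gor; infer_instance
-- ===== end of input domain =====

-- B differs from A by an iterative (instead of recursive, re-padding) column compressor; both
-- Pythons mutate the argument in place identically and return it, so the ports model the final value.

-- ===== PORT A =====
-- A[i][j] read/write: indices 0..3 are in range under Pre_ (where Python does not raise), so
-- getD / List.set are exact there.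
def pvGet2 (A : List (List Int)) (i j : Nat) : Int := (A.getD i []).getD j 0
def pvSet2 (A : List (List Int)) (i j : Nat) (v : Int) : List (List Int) :=
  A.set i ((A.getD i []).set j v)

-- the zero-dropping loop that builds B ('if A[i] != 0: B += [A[i]]')
def pvNz (A : List Int) : List Int :=
  A.foldl (fun acc x => if x ≠ 0 then acc ++ [x] else acc) []

theorem pvNz_length_le (A : List Int) : (pvNz A).length ≤ A.length := by
  rw [pvNz, PySem.List.foldl_append_ite_eq_filter]
  simpa using List.length_filter_le _ A

-- recursive compressor of A, step for step (filter loop, 4-way branch, zero padding)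
def stisni_vrstico_levo (A : List Int) : List Int :=
  let B2 : List Int :=
    match h : pvNz A with
    | [] => []
    | [x] => [x]
    | x :: y :: rest =>
      if x ≠ y then
        [x] ++ stisni_vrstico_levo (y :: rest)          -- B[1:]
      else
        [2 * x] ++ stisni_vrstico_levo rest             -- B[2:]
  B2 ++ List.replicate (A.length - B2.length) 0
termination_by A.length
decreasing_by
  all_goals
    have hl := pvNz_length_le A
    rw [h] at hl
    simp only [List.length_cons] at hl ⊢
    omega

def stisni_gor (A : List (List Int)) : List (List Int) :=
  (List.range 4).foldl (fun A j =>
    let vrstica := (List.range 4).foldl (fun acc i => acc ++ [pvGet2 A i j]) []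
    let B := stisni_vrstico_levo vrstica
    (List.range 4).foldl (fun A i => pvSet2 A i j (B.getD i 0)) A) A

-- ===== PORT B =====
-- iterative two-pointer sweep of the while loop in Source B
def pvSweep : List Int → List Int
  | [] => []
  | [x] => [x]
  | x :: y :: rest => if x == y then 2 * x :: pvSweep rest else x :: pvSweep (y :: rest)

def stisni_gor_alt (A : List (List Int)) : List (List Int) :=
  (List.range 4).foldl (fun A j =>
    let nz := ((List.range 4).map (fun i => pvGet2 A i j)).filter (fun v => v ≠ 0)
    let out := pvSweep nz
    let out2 := out ++ List.replicate (4 - out.length) 0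
    (List.range 4).foldl (fun A i => pvSet2 A i j (out2.getD i 0)) A) A

-- ===== PRECONDITION & SPEC =====
-- Pre_: exactly the grids on which Python A returns (A[i][j] for i,j in 0..3 exists); otherwise A raises IndexError.
def Pre_stisni_gor (A : List (List Int)) : Prop :=
  4 ≤ A.length ∧ ∀ r ∈ A.take 4, 4 ≤ r.length
instance (A : List (List Int)) : Decidable (Pre_stisni_gor A) := by unfold Pre_stisni_gor; infer_instance

def pvWitness_stisni_gor : List (List Int) :=
  [[2, 2, 0, 0], [2, 0, 2, 0], [0, 2, 2, 0], [2, 0, 0, 4]]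

def Spec_stisni_gor (A : List (List Int)) (out : List (List Int)) : Prop := out = stisni_gor_alt A
instance (A : List (List Int)) (out : List (List Int)) : Decidable (Spec_stisni_gor A out) := by unfold Spec_stisni_gor; infer_instance

-- ===== CLAIM (what is proved, stated in full; the proofs are below) =====
def Claim_equal_stisni_gor : Prop := ∀ (A : List (List Int)), Dom_stisni_gor A → Pre_stisni_gor A → Spec_stisni_gor A (stisni_gor A)

-- ===== LEMMAS AND PROOFS =====

theorem pvSweep_length_le (l : List Int) : (pvSweep l).length ≤ l.length := by
  fun_induction pvSweep l <;> simp_all <;> omega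

theorem pvNz_eq_filter (A : List Int) : pvNz A = A.filter (fun v => v ≠ 0) := by
  rw [pvNz, PySem.List.foldl_append_ite_eq_filter]; rfl

-- the core correspondence: A's recursive compressor = filter, sweep, pad once
theorem stisni_eq_sweep (A : List Int) :
    stisni_vrstico_levo A =
      pvSweep (pvNz A) ++ List.replicate (A.length - (pvSweep (pvNz A)).length) 0 := by
  induction hn : A.length using Nat.strong_induction_on generalizing A with
  | _ n ih =>
  subst hn
  rw [stisni_vrstico_levo]
  have hBnz : ∀ x ∈ pvNz A, x ≠ 0 := by
    intro x hx
    rw [pvNz_eq_filter] at hx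
    simpa using List.of_mem_filter hx
  have hfix : ∀ (l : List Int), (∀ x ∈ l, x ≠ 0) → pvNz l = l := by
    intro l hl
    rw [pvNz_eq_filter]
    apply List.filter_eq_self.2
    intro a ha; simpa using hl a ha
  split
  next hBm =>
    rw [hBm]; simp [pvSweep]
  next x hBm =>
    rw [hBm]; simp [pvSweep]
  next x y rest hBm =>
    have hB := pvNz_length_le A
    rw [hBm] at hB hBnz
    simp only [List.length_cons] at hB
    have hnz' : ∀ z ∈ y :: rest, z ≠ 0 := fun z hz => hBnz z (List.mem_cons_of_mem _ hz)
    rw [hBm]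
    by_cases hxy : x = y
    · rw [if_neg (by simp [hxy])]
      have ihr := ih rest.length (by omega) rest rfl
      rw [ihr, hfix rest (fun z hz => hnz' z (List.mem_cons_of_mem _ hz))]
      have hsl : (pvSweep rest).length ≤ rest.length := pvSweep_length_le rest
      simp only [pvSweep, hxy, BEq.rfl, if_pos]
      simp only [List.cons_append, List.append_assoc, List.nil_append,
        List.length_append, List.length_cons, List.length_replicate,
        ← List.replicate_add]
      exact congrArg₂ List.cons rfl
        (congrArg₂ (· ++ ·) rfl (congrArg₂ List.replicate (by omega) rfl))
    · rw [if_pos (by simpa using hxy)]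
      have ihr := ih (y :: rest).length (by simp; omega) (y :: rest) rfl
      rw [ihr, hfix _ hnz']
      have hsl : (pvSweep (y :: rest)).length ≤ (y :: rest).length := pvSweep_length_le _
      simp only [List.length_cons] at hsl
      have hsw : pvSweep (x :: y :: rest) = x :: pvSweep (y :: rest) := by
        simp [pvSweep, hxy]
      rw [hsw]
      simp only [List.cons_append, List.append_assoc, List.nil_append,
        List.length_append, List.length_cons, List.length_replicate,
        ← List.replicate_add]
      exact congrArg₂ List.cons rfl
        (congrArg₂ (· ++ ·) rfl (congrArg₂ List.replicate (by omega) rfl))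

theorem stisni_gor_eq_alt (A : List (List Int)) : stisni_gor A = stisni_gor_alt A := by
  unfold stisni_gor stisni_gor_alt
  apply PySem.List.foldl_congr_mem
  intro a j _
  have hcol : (List.range 4).foldl (fun acc i => acc ++ [pvGet2 a i j]) [] =
      (List.range 4).map (fun i => pvGet2 a i j) := by
    simpa using PySem.List.foldl_append_singleton_eq_map (f := fun i => pvGet2 a i j)
      (l := List.range 4) (acc := [])
  simp only [hcol, stisni_eq_sweep, pvNz_eq_filter, List.length_map, List.length_range]

-- ===== VERDICT (by name: the statement is the Claim_ definition above) =====
theorem stisni_gor_spec : Claim_equal_stisni_gor := by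
  intro A _ _
  unfold Spec_stisni_gor
  exact stisni_gor_eq_alt A
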